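-- pv_equiv track=rewrite | github.com/leoc39129/leetcode | strings/LC68.py | setWhiteSpaces
-- ===== SOURCE A (Python) =====
-- def setWhiteSpaces(line_strs, line_len, maxWidth, words):
--     whitespaces = [0]*(len(line_strs)-1)
--     total = 0
--     idx = 0
--     while total < maxWidth - line_len:
--         whitespaces[idx] += 1
--         total += 1
--         idx += 1
--         if idx > len(whitespaces)-1:
--             idx = 0
--     for idx in range(len(line_strs)-1):
--         line_strs[idx] = line_strs[idx] + " "*whitespaces[idx]
--     return "".join(line_strs)
-- ===== SOURCE B (Python) =====
-- def setWhiteSpaces(line_strs, line_len, maxWidth, words):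
--     gaps = len(line_strs) - 1
--     if gaps <= 0:
--         return "".join(line_strs)
--     spare = max(maxWidth - line_len, 0)
--     base, rem = divmod(spare, gaps)
--     return "".join(
--         s + " " * (base + (1 if i < rem else 0))
--         for i, s in enumerate(line_strs[:-1])
--     ) + line_strs[-1]
-- ===== Notes on version B (the rewrite author's own statement) =====
-- stated objective: alternative
-- what changed: Replaces the one-space-at-a-time round-robin while loop (maxWidth - line_len iterations) with a closed-form divmod: each gap gets spare//gaps spaces plus one extra for the first spare%gaps gaps.
import Mathlib
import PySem

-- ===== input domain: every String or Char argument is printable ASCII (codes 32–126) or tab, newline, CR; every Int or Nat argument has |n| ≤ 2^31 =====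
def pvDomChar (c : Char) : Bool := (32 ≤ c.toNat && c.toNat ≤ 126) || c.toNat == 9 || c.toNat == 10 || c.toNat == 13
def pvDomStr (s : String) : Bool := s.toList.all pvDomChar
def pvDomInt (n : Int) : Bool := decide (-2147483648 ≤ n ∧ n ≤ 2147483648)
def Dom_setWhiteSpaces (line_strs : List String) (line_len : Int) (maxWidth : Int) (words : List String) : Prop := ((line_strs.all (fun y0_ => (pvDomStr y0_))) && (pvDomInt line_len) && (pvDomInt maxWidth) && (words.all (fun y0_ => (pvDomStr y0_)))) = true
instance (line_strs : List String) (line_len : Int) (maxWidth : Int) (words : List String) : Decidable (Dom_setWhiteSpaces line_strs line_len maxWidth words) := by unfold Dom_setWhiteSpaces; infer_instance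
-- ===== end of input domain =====

-- B replaces A's one-space-at-a-time round-robin while loop by a closed-form divmod per gap.
-- A mutates line_strs in place (appends spaces to its elements); the equivalence proved here is about the RETURN value only.

-- ===== PORT A =====
-- A's while loop: add one space at a time, round-robin over the gap counters
def pvALoop (ws : List Int) (spare : Int) (total : Int) (idx : Nat) : List Int :=
  if _h : total < spare then
    let ws' := ws.set idx (ws.getD idx 0 + 1)
    let idx1 := idx + 1
    let idx2 := if (idx1 : Int) > (ws'.length : Int) - 1 then 0 else idx1
    pvALoop ws' spare (total + 1) idx2
  else ws
termination_by (spare - total).toNat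
decreasing_by omega

-- A's for loop: append whitespaces[idx] spaces to each of the first len-1 strings
def pvPad : List String → List Int → List String
  | s :: rest, w :: ws => (s ++ String.mk (List.replicate w.toNat ' ')) :: pvPad rest ws
  | rest, [] => rest
  | [], _ => []

def setWhiteSpaces (line_strs : List String) (line_len : Int) (maxWidth : Int) (words : List String) : String :=
  let whitespaces := List.replicate (line_strs.length - 1) (0 : Int)
  let whitespaces := pvALoop whitespaces (maxWidth - line_len) 0 0
  String.join (pvPad line_strs whitespaces)

-- ===== PORT B =====
def setWhiteSpaces_alt (line_strs : List String) (line_len : Int) (maxWidth : Int) (words : List String) : String :=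
  let gaps : Int := (line_strs.length : Int) - 1
  if gaps ≤ 0 then String.join line_strs
  else
    let spare := max (maxWidth - line_len) 0
    let base := PySem.Int.floordiv spare gaps
    let rem := PySem.Int.mod spare gaps
    String.join (line_strs.dropLast.zipIdx.map (fun p =>
      p.1 ++ String.mk (List.replicate (base + (if (p.2 : Int) < rem then 1 else 0)).toNat ' ')))
      ++ line_strs.getLastD ""

-- ===== PRECONDITION & SPEC =====
-- Pre_ excludes exactly the inputs on which A raises IndexError: fewer than two strings while spare width is still to distribute.
def Pre_setWhiteSpaces (line_strs : List String) (line_len : Int) (maxWidth : Int) (words : List String) : Prop :=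
  2 ≤ line_strs.length ∨ maxWidth ≤ line_len
instance (line_strs : List String) (line_len : Int) (maxWidth : Int) (words : List String) : Decidable (Pre_setWhiteSpaces line_strs line_len maxWidth words) := by unfold Pre_setWhiteSpaces; infer_instance

def pvWitness_setWhiteSpaces : List String × Int × Int × List String := (["a", "bc", "d"], 6, 11, ["a", "bc", "d"])

def Spec_setWhiteSpaces (line_strs : List String) (line_len : Int) (maxWidth : Int) (words : List String) (out : String) : Prop := out = setWhiteSpaces_alt line_strs line_len maxWidth words
instance (line_strs : List String) (line_len : Int) (maxWidth : Int) (words : List String) (out : String) : Decidable (Spec_setWhiteSpaces line_strs line_len maxWidth words out) := by unfold Spec_setWhiteSpaces; infer_instance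

-- ===== CLAIM (what is proved, stated in full; the proofs are below) =====
def Claim_equal_setWhiteSpaces : Prop := ∀ (line_strs : List String) (line_len : Int) (maxWidth : Int) (words : List String), Dom_setWhiteSpaces line_strs line_len maxWidth words → Pre_setWhiteSpaces line_strs line_len maxWidth words → Spec_setWhiteSpaces line_strs line_len maxWidth words (setWhiteSpaces line_strs line_len maxWidth words)

-- ===== LEMMAS AND PROOFS =====

lemma pvALoop_length : ∀ (n : Nat) (ws : List Int) (spare total : Int) (idx : Nat),
    (spare - total).toNat = n → (pvALoop ws spare total idx).length = ws.length := by
  intro n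
  induction n with
  | zero => intro ws spare total idx h; rw [pvALoop]; simp only [dif_neg (by omega : ¬ total < spare)]
  | succ n ih =>
    intro ws spare total idx h
    rw [pvALoop]
    by_cases hc : total < spare
    · simp only [dif_pos hc]
      rw [ih _ _ _ _ (by omega)]
      simp
    · simp [dif_neg hc]

lemma pvPad_split : ∀ (ls : List String) (ws : List Int), ws.length + 1 = ls.length →
    pvPad ls ws = (ls.dropLast.zip ws).map
        (fun p => p.1 ++ String.mk (List.replicate p.2.toNat ' ')) ++ [ls.getLastD ""] := by
  intro ls
  induction ls with
  | nil => intro ws h; simp at h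
  | cons a t ih =>
    intro ws h
    cases t with
    | nil =>
      cases ws with
      | nil => simp [pvPad]
      | cons w ws' => simp at h
    | cons b t' =>
      cases ws with
      | nil => simp at h
      | cons w ws' =>
        have := ih ws' (by simpa using h)
        simp only [pvPad, List.dropLast_cons_of_ne_nil (by simp : (b :: t') ≠ []), List.zip_cons_cons,
          List.map_cons, List.cons_append, List.getLastD_cons]
        rw [this]
        congr 1
        cases t' with
        | nil => simp
        | cons x xs =>
          obtain ⟨y, hy⟩ : ∃ y, (x :: xs).getLast? = some y := by
            cases hL : (x :: xs).getLast? with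
            | none => simp [List.getLast?_eq_none_iff] at hL
            | some y => exact ⟨y, rfl⟩
          simp [hy]

lemma cnt_closed (g : Nat) (hg : 0 < g) :
    ∀ (n : Nat) (i : Nat), i < g →
      (List.range n).countP (fun j => j % g = i) = n / g + (if i < n % g then 1 else 0) := by
  intro n
  induction n with
  | zero => intro i hi; simp
  | succ n ih =>
    intro i hi
    rw [List.range_succ, List.countP_append, ih i hi]
    have hmod : n % g < g := Nat.mod_lt _ hg
    have hdm : g * (n / g) + n % g = n := Nat.div_add_mod n g
    have hcnt : List.countP (fun j => decide (j % g = i)) [n] = if n % g = i then 1 else 0 := by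
      by_cases h : n % g = i <;> simp [h]
    by_cases hr : n % g + 1 = g
    · have hmul : g * (n / g + 1) = g * (n / g) + g := by ring
      have h1 : n + 1 = g * (n / g + 1) := by omega
      have hd : (n + 1) / g = n / g + 1 := by rw [h1, Nat.mul_div_cancel_left _ hg]
      have hm : (n + 1) % g = 0 := by rw [h1, Nat.mul_mod_right]
      rw [hcnt, hd, hm]
      split_ifs <;> omega
    · have h1 : n + 1 = g * (n / g) + (n % g + 1) := by omega
      have h2 : (n % g + 1) / g = 0 := Nat.div_eq_of_lt (by omega)
      have hd : (n + 1) / g = n / g := by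
        rw [h1, Nat.mul_add_div hg, h2]
        ring
      have hm : (n + 1) % g = n % g + 1 := by
        rw [h1, Nat.mul_add_mod, Nat.mod_eq_of_lt (by omega)]
      rw [hcnt, hd, hm]
      split_ifs <;> omega

lemma pvALoop_getD (g : Nat) (hg : 0 < g) :
    ∀ (n : Nat) (ws : List Int) (spare total : Int) (idx : Nat),
      ws.length = g → idx < g → (spare - total).toNat = n →
      ∀ i, i < g →
        (pvALoop ws spare total idx).getD i 0
          = ws.getD i 0 + ((List.range n).countP (fun j => (idx + j) % g = i) : Int) := by
  intro n
  induction n with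
  | zero =>
    intro ws spare total idx hlen hidx hn i hi
    rw [pvALoop]
    simp only [dif_neg (by omega : ¬ total < spare)]
    simp
  | succ n ih =>
    intro ws spare total idx hlen hidx hn i hi
    have hc : total < spare := by omega
    rw [pvALoop]
    simp only [dif_pos hc]
    have hlen' : (ws.set idx (ws.getD idx 0 + 1)).length = g := by simp [hlen]
    have hidx2 : (if ((idx + 1 : Nat) : Int) > ((ws.set idx (ws.getD idx 0 + 1)).length : Int) - 1
        then 0 else idx + 1) = (idx + 1) % g := by
      rw [hlen']
      by_cases he : idx + 1 = g
      · rw [if_pos (by push_cast; omega), he, Nat.mod_self]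
      · have hlt : idx + 1 < g := by omega
        rw [if_neg (by push_cast; omega), Nat.mod_eq_of_lt hlt]
    rw [hidx2, ih _ spare (total + 1) _ hlen' (Nat.mod_lt _ hg) (by omega) i hi]
    have hset : (ws.set idx (ws.getD idx 0 + 1)).getD i 0
        = ws.getD i 0 + (if idx = i then 1 else 0) := by
      by_cases he : idx = i <;>
        simp [List.getD, List.getElem?_set, he, hlen, hi]
    rw [hset]
    have hcount : ((List.range (n + 1)).countP (fun j => (idx + j) % g = i) : Int)
        = (if idx = i then 1 else 0) + ((List.range n).countP (fun j => ((idx + 1) % g + j) % g = i) : Int) := by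
      rw [List.range_succ_eq_map, List.countP_cons, List.countP_map]
      have h0 : (decide ((idx + 0) % g = i)) = (if idx = i then true else false) := by
        by_cases he : idx = i <;> simp [he, Nat.mod_eq_of_lt hidx, Nat.mod_eq_of_lt hi]
      have hcong : List.countP ((fun j => decide ((idx + j) % g = i)) ∘ Nat.succ) (List.range n)
          = List.countP (fun j => decide (((idx + 1) % g + j) % g = i)) (List.range n) := by
        apply List.countP_congr
        intro j _
        have hmm : (idx + Nat.succ j) % g = ((idx + 1) % g + j) % g := by
          rw [Nat.mod_add_mod, show idx + 1 + j = idx + Nat.succ j by omega]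
        simp [Function.comp, hmm]
      rw [hcong, h0]
      by_cases he : idx = i <;> simp [he] <;> push_cast <;> ring
    rw [hcount]
    ring

lemma foldl_str : ∀ (l : List String) (init : String),
    List.foldl (fun r s => r ++ s) init l = init ++ List.foldl (fun r s => r ++ s) "" l := by
  intro l
  induction l with
  | nil => simp
  | cons a t ih =>
    intro init
    simp only [List.foldl_cons]
    rw [ih (init ++ a), ih ("" ++ a)]
    simp [String.append_assoc]

lemma join_append (l₁ l₂ : List String) : String.join (l₁ ++ l₂) = String.join l₁ ++ String.join l₂ := by
  simp only [String.join, List.foldl_append]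
  rw [foldl_str l₂]

lemma pvPad_nil : ∀ (ls : List String), pvPad ls [] = ls := by
  intro ls; cases ls <;> rfl

theorem pv_main (ls : List String) (ll mw : Int) (words : List String)
    (hpre : 2 ≤ ls.length ∨ mw ≤ ll) :
    setWhiteSpaces ls ll mw words = setWhiteSpaces_alt ls ll mw words := by
  unfold setWhiteSpaces setWhiteSpaces_alt
  dsimp only
  by_cases hlen : ls.length ≤ 1
  · -- at most one string: no gaps
    have hml : mw ≤ ll := by rcases hpre with h | h <;> omega
    have h0 : ls.length - 1 = 0 := by omega
    rw [h0, if_pos (by push_cast; omega)]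
    simp only [List.replicate_zero]
    rw [pvALoop]
    simp only [dif_neg (by omega : ¬ (0:Int) < mw - ll)]
    rw [pvPad_nil]
  · -- at least two strings
    set g : Nat := ls.length - 1 with hgdef
    have hg : 0 < g := by omega
    set n : Nat := (mw - ll).toNat with hndef
    rw [if_neg (by push_cast; omega)]
    -- B's spare / base / rem in Nat form
    have hspare : max (mw - ll) 0 = ((n : Int)) := (Int.ofNat_toNat _).symm
    rw [hspare]
    have hglen : ((ls.length : Int) - 1) = (g : Int) := by push_cast; omega
    rw [hglen, PySem.Int.floordiv_natCast, PySem.Int.mod_natCast]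
    -- A's loop result
    have hlenA : (pvALoop (List.replicate g 0) (mw - ll) 0 0).length = g := by
      rw [pvALoop_length ((mw - ll) - 0).toNat _ _ _ _ rfl]; simp
    have hgetA : ∀ i, i < g → (pvALoop (List.replicate g 0) (mw - ll) 0 0).getD i 0
        = ((n / g + (if i < n % g then 1 else 0) : Nat) : Int) := by
      intro i hi
      rw [pvALoop_getD g hg n _ _ _ _ (by simp) hg (by simp [hndef]) i hi]
      have : List.countP (fun j => decide ((0 + j) % g = i)) (List.range n)
          = List.countP (fun j => decide (j % g = i)) (List.range n) := by
        apply List.countP_congr; intro j _; simp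
      rw [this, cnt_closed g hg n i hi]
      simp
    -- split the padded list
    rw [pvPad_split ls _ (by omega), join_append]
    have hjoin1 : String.join [ls.getLastD ""] = ls.getLastD "" := by simp [String.join]
    rw [hjoin1]
    congr 1
    congr 1
    -- the two mapped gap lists are equal
    apply List.ext_getElem
    · simp [hlenA]; omega
    · intro i h1 h2
      have hi : i < g := by simp [hlenA] at h1; omega
      have hdl : i < ls.dropLast.length := by simp; omega
      simp only [List.getElem_map, List.getElem_zip, List.getElem_zipIdx]
      have : (pvALoop (List.replicate g 0) (mw - ll) 0 0)[i] =
          ((n / g + (if i < n % g then 1 else 0) : Nat) : Int) := by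
        rw [← List.getD_eq_getElem _ 0, hgetA i hi]
      rw [this]
      simp only [Nat.zero_add]
      have hR : ((n / g : Nat) : Int) + (if ((i : Int)) < ((n % g : Nat) : Int) then (1:Int) else 0)
          = ((n / g + (if i < n % g then 1 else 0) : Nat) : Int) := by
        by_cases hc : i < n % g
        · rw [if_pos (by exact_mod_cast hc), if_pos hc]; push_cast; ring
        · rw [if_neg (by exact_mod_cast hc), if_neg hc]; push_cast; ring
      rw [hR]

-- ===== VERDICT (by name: the statement is the Claim_ definition above) =====
theorem setWhiteSpaces_spec : Claim_equal_setWhiteSpaces := by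
  intro ls ll mw words _ hpre
  unfold Spec_setWhiteSpaces
  exact pv_main ls ll mw words hpre
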